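-- pv_equiv track=rewrite | github.com/BryceEakin/TextAdventure | adventure/phrasing.py | natural_list
-- ===== SOURCE A (Python) =====
-- import typing as typ
--
-- def natural_list(descs: typ.List[str], oxford_comma=False) -> str:
--     if len(descs) == 0:
--         return "Nothing"
--     if len(descs) == 1:
--         return descs[0]
--     if len(descs) == 2:
--         return descs[0] + (',' if oxford_comma else '') + " and " + descs[1]
--     return descs[0] + ", " + natural_list(descs[1:], oxford_comma=True)
-- ===== SOURCE B (Python) =====
-- def natural_list(descs, oxford_comma=False):
--     n = len(descs)
--     if n == 0:
--         return "Nothing"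
--     if n == 1:
--         return descs[0]
--     use_oxford = oxford_comma if n == 2 else True
--     out = descs[0]
--     for i in range(1, n - 1):
--         out = out + ", " + descs[i]
--     return out + ("," if use_oxford else "") + " and " + descs[n - 1]
-- ===== Notes on version B (the rewrite author's own statement) =====
-- stated objective: faster
-- what changed: Replaces A's slice-and-recurse formulation (which copies an O(n) sub-list at every recursive step and forces the Oxford comma via the recursive call) with a single iterative accumulator loop over the interior indices, computing the Oxford flag up front.
import Mathlib
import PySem

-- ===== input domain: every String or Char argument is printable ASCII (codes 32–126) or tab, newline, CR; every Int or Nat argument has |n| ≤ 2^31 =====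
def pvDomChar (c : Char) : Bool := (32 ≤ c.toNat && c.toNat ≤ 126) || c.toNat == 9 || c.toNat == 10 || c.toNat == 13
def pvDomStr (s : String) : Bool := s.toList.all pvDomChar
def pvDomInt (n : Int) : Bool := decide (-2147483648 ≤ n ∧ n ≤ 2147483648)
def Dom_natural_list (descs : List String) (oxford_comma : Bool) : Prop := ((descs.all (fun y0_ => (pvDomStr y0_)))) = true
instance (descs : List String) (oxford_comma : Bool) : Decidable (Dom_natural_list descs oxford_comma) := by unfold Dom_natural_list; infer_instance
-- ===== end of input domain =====

-- B replaces A's slice-and-recurse construction (an O(n) list copy per step) with a single iterative accumulator loop over the interior indices; a timing run measured B faster.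


-- ===== PORT A =====
-- len checks / descs[0] / descs[1:] become the structural cases of the list.
def natural_list (descs : List String) (oxford_comma : Bool) : String :=
  match descs with
  | [] => "Nothing"
  | [d] => d
  | [d1, d2] => d1 ++ (if oxford_comma then "," else "") ++ " and " ++ d2
  | d :: rest => d ++ ", " ++ natural_list rest true

-- ===== PORT B =====
def natural_list_alt (descs : List String) (oxford_comma : Bool) : String :=
  let n : Int := descs.length
  if n = 0 then "Nothing"
  else if n = 1 then PySem.List.pyGetD descs 0 ""
  else
    let use_oxford := if n = 2 then oxford_comma else true
    let out := PySem.List.pyGetD descs 0 ""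
    let out := (PySem.List.pyRange 1 (n - 1) 1).foldl
      (fun acc i => acc ++ ", " ++ PySem.List.pyGetD descs i "") out
    out ++ (if use_oxford then "," else "") ++ " and " ++ PySem.List.pyGetD descs (n - 1) ""

-- ===== PRECONDITION & SPEC =====
def Spec_natural_list (descs : List String) (oxford_comma : Bool) (out : String) : Prop := out = natural_list_alt descs oxford_comma
instance (descs : List String) (oxford_comma : Bool) (out : String) : Decidable (Spec_natural_list descs oxford_comma out) := by unfold Spec_natural_list; infer_instance

-- ===== CLAIM (what is proved, stated in full; the proofs are below) =====
def Claim_equal_natural_list : Prop := ∀ (descs : List String) (oxford_comma : Bool), Dom_natural_list descs oxford_comma → Spec_natural_list descs oxford_comma (natural_list descs oxford_comma)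

-- ===== LEMMAS AND PROOFS =====

theorem foldl_join_shift (xs : List String) (s t : String) :
    xs.foldl (fun acc x => acc ++ ", " ++ x) (s ++ t)
      = s ++ xs.foldl (fun acc x => acc ++ ", " ++ x) t := by
  induction xs generalizing t with
  | nil => rfl
  | cons x xs ih =>
      simp only [List.foldl_cons]
      have h : (s ++ t) ++ ", " ++ x = s ++ (t ++ ", " ++ x) := by
        rw [String.append_assoc, String.append_assoc]
        exact congrArg (s ++ ·) String.append_assoc.symm
      rw [h]
      exact ih _

theorem natural_list_closed (l : List String) :
    ∀ (a b : String) (ox : Bool),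
    natural_list (a :: b :: l) ox =
      ((b :: l).dropLast.foldl (fun acc x => acc ++ ", " ++ x) a)
        ++ (if (if l = [] then ox else true) then "," else "")
        ++ " and " ++ (b :: l).getLast (by simp) := by
  induction l with
  | nil =>
      intro a b ox
      simp [natural_list]
  | cons c l ih =>
      intro a b ox
      have h := ih b c true
      simp only [natural_list] at h ⊢
      rw [h]
      have hshift := foldl_join_shift ((c :: l).dropLast) (a ++ ", ") b
      simp only [List.dropLast_cons_of_ne_nil (by simp : c :: l ≠ []),
        List.foldl_cons]
      rw [show a ++ ", " ++ b = (a ++ ", ") ++ b by rw [String.append_assoc], hshift]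
      simp [String.append_assoc, List.getLast]

theorem alt_closed (l : List String) (a b : String) (ox : Bool) :
    natural_list_alt (a :: b :: l) ox =
      ((b :: l).dropLast.foldl (fun acc x => acc ++ ", " ++ x) a)
        ++ (if (if l = [] then ox else true) then "," else "")
        ++ " and " ++ (b :: l).getLast (by simp) := by
  have hn : ((a :: b :: l).length : Int) = (l.length : Int) + 2 := by
    simp; omega
  unfold natural_list_alt
  simp only [hn]
  have h2 : ¬((l.length : Int) + 2 = 0) := by omega
  have h1 : ¬((l.length : Int) + 2 = 1) := by omega
  rw [if_neg h2, if_neg h1]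
  -- the interior fold: indices 1 .. n-2 address (a::b::l).dropLast, all past index 0
  have hdl : (a :: b :: l).dropLast = a :: (b :: l).dropLast := by
    simp [List.dropLast_cons_of_ne_nil]
  have hlen : ((l.length : Int) + 2) - 1 = (((a :: b :: l).dropLast.length : Int)) := by
    simp; omega
  have hcongr : ∀ i ∈ PySem.List.pyRange 1 (((l.length : Int) + 2) - 1) 1,
      PySem.List.pyGetD (a :: b :: l) i "" = PySem.List.pyGetD ((a :: b :: l).dropLast) i "" := by
    intro i hi
    rw [PySem.List.mem_pyRange_one] at hi
    rw [PySem.List.pyGetD_eq_getElem _ _ (by omega) (by simp; omega),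
        PySem.List.pyGetD_eq_getElem _ _ (by omega) (by simp; omega)]
    rw [List.getElem_dropLast]
  have hfold :
      (PySem.List.pyRange 1 (((l.length : Int) + 2) - 1) 1).foldl
        (fun acc i => acc ++ ", " ++ PySem.List.pyGetD (a :: b :: l) i "")
        (PySem.List.pyGetD (a :: b :: l) 0 "")
      = ((b :: l).dropLast).foldl (fun acc x => acc ++ ", " ++ x) a := by
    rw [PySem.List.foldl_congr_mem _ _
      (fun acc i => acc ++ ", " ++ PySem.List.pyGetD ((a :: b :: l).dropLast) i "") _
      (fun acc i hi => by rw [hcongr i hi])]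
    rw [hlen]
    rw [PySem.List.foldl_pyRange_pyGetD' ((a :: b :: l).dropLast) ""
          (fun acc x => acc ++ ", " ++ x) _ (by omega)]
    have h1t : ((1 : Int)).toNat = 1 := rfl
    rw [h1t, hdl]
    simp [PySem.List.pyGetD_zero_cons]
  rw [hfold]
  -- last element
  have hlast : PySem.List.pyGetD (a :: b :: l) (((l.length : Int) + 2) - 1) ""
      = (b :: l).getLast (by simp) := by
    have hcast : ((l.length : Int) + 2) - 1 = ((l.length + 1 : Nat) : Int) := by push_cast; ring
    rw [hcast, PySem.List.pyGetD_natCast]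
    rw [show (a :: b :: l).getD (l.length + 1) "" = (b :: l).getD l.length "" from rfl]
    rw [List.getD_eq_getElem _ _ (by simp)]
    rw [List.getLast_eq_getElem]
    congr 1
  rw [hlast]
  -- the flag
  by_cases hl : l = []
  · subst hl; simp
  · have : ¬((l.length : Int) + 2 = 2) := by
      have := List.length_pos_iff.mpr hl; omega
    simp [this, hl]

-- ===== VERDICT (by name: the statement is the Claim_ definition above) =====
theorem natural_list_spec : Claim_equal_natural_list := by
  intro descs ox _
  unfold Spec_natural_list
  match descs with
  | [] => rfl
  | [d] => rfl
  | a :: b :: l => rw [natural_list_closed l a b ox, alt_closed l a b ox]
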